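-- pv_equiv track=rewrite | github.com/navkant/ds_algo_practice | scaler/queues/task_scheduling.py | solve
-- ===== SOURCE A (Python) =====
-- class Queue:
--     def __init__(self):
--         self.start = -1
--         self.end = -1
--         self.queue = []
--
--     def enqueue(self, e):
--         self.queue.append(e)
--         self.end += 1
--
--     def is_empty(self):
--         if self.start == self.end:
--             return True
--         return False
--
--     def dequeue(self):
--         x = self.queue[self.start]
--         self.start += 1
--         return x
--
--     def deque_last(self):
--         x = self.queue.pop()
--         self.end -= 1
--         return x
--
--     def get_size(self):
--         return self.end - self.start
--
--     def front(self):
--         return self.queue[self.start+1]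
--
--     def last(self):
--         return self.queue[self.end]
--
-- def solve(A, B):
--     order_q = Queue()
--     for i in B:
--         order_q.enqueue(i)
--
--     task_q = Queue()
--     for j in A:
--         task_q.enqueue(j)
--
--     cycles = 0
--     while not task_q.is_empty():
--         curr_task = task_q.front()
--
--         if curr_task == order_q.front():
--             task_q.dequeue()
--             order_q.dequeue()
--         else:
--             task_q.dequeue()
--             task_q.enqueue(curr_task)
--
--         cycles += 1
--     return cycles
-- ===== SOURCE B (Python) =====
-- def solve(A, B):
--     # Phase-based: for each required task b, jump straight to b's first
--     # occurrence in the pending list (k rotations + 1 match = k+1 cycles)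
--     # and rebuild the pending list by slicing instead of rotating one at a time.
--     tasks = list(A)
--     cycles = 0
--     for b in B:
--         if not tasks:
--             break
--         k = tasks.index(b)
--         cycles += k + 1
--         tasks = tasks[k + 1:] + tasks[:k]
--     return cycles
-- ===== Notes on version B (the rewrite author's own statement) =====
-- stated objective: alternative
-- what changed: Replaces A's hand-rolled Queue object rotated one element per cycle by a phase loop over B that locates the needed task with list.index, adds k+1 cycles at once, and rebuilds the pending list by slicing.
import Mathlib
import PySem

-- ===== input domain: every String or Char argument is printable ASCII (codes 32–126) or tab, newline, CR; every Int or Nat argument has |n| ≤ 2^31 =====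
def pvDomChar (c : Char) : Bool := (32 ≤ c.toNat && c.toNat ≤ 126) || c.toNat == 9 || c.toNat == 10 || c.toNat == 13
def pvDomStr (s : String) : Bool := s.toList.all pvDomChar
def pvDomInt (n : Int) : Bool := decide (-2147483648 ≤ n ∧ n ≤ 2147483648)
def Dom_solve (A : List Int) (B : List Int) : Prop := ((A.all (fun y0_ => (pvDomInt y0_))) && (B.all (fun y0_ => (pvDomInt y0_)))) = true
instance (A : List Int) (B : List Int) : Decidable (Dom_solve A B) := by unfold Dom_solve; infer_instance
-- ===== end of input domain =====

-- B replaces A's one-rotation-per-cycle Queue simulation by a phase loop over B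
-- that jumps to the needed task with list.index and rebuilds the pending list by
-- slicing (objective: a genuinely different, plainer decomposition of the same count).


-- ===== PORT A =====
-- the Queue class: fields start, end, queue
structure PyQueue where
  start : Int
  end_ : Int
  queue : List Int
deriving DecidableEq, Repr

-- Queue() constructor
def pyQueueNew : PyQueue := ⟨-1, -1, []⟩

-- Queue.enqueue: append + end += 1
def pyEnqueue (q : PyQueue) (e : Int) : PyQueue := ⟨q.start, q.end_ + 1, q.queue ++ [e]⟩

-- Queue.is_empty: start == end
def pyIsEmpty (q : PyQueue) : Bool := q.start == q.end_

-- Queue.front: self.queue[self.start+1]  (none = IndexError)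
def pyFront (q : PyQueue) : Option Int := PySem.List.pyGet? q.queue (q.start + 1)

-- Queue.dequeue: reads self.queue[self.start] (possibly a negative index), start += 1
def pyDequeue (q : PyQueue) : Option (Int × PyQueue) :=
  (PySem.List.pyGet? q.queue q.start).map (fun x => (x, ⟨q.start + 1, q.end_, q.queue⟩))

-- the while loop of solve; fuel only makes the recursion total (the loop diverges in
-- Python on some inputs, all outside Pre_solve); none = IndexError or out of fuel
def solveLoop : Nat → PyQueue → PyQueue → Int → Option Int
  | 0, _, _, _ => none
  | fuel+1, task_q, order_q, cycles =>
    if pyIsEmpty task_q then some cycles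
    else
      match pyFront task_q with
      | none => none
      | some curr_task =>
        match pyFront order_q with
        | none => none
        | some order_front =>
          if curr_task = order_front then
            match pyDequeue task_q with
            | none => none
            | some (_, task_q') =>
              match pyDequeue order_q with
              | none => none
              | some (_, order_q') => solveLoop fuel task_q' order_q' (cycles + 1)
          else
            match pyDequeue task_q with
            | none => none
            | some (_, task_q') => solveLoop fuel (pyEnqueue task_q' curr_task) order_q (cycles + 1)

def solve (A : List Int) (B : List Int) : Int :=
  let order_q := B.foldl pyEnqueue pyQueueNew
  let task_q := A.foldl pyEnqueue pyQueueNew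
  -- fuel A.length^2 + 1 strictly exceeds the ≤ A.length*(A.length+1)/2 cycles any
  -- terminating run performs; .getD 0 is never taken on Pre_solve inputs
  (solveLoop (A.length * A.length + 1) task_q order_q 0).getD 0

-- ===== PORT B =====
-- for b in B: locate b (list.index; none = ValueError, outside Pre_solve),
-- add k+1 cycles, tasks = tasks[k+1:] + tasks[:k]
def solveAltGo (tasks : List Int) (cycles : Int) (bs : List Int) : Int :=
  match bs with
  | [] => cycles
  | b :: bs' =>
    if tasks = [] then cycles
    else
      match PySem.List.index? tasks b with
      | none => cycles
      | some k =>
        solveAltGo (PySem.List.slice tasks (some ((k : Int) + 1)) none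
                      ++ PySem.List.slice tasks none (some (k : Int)))
          (cycles + (k : Int) + 1) bs'

def solve_alt (A : List Int) (B : List Int) : Int := solveAltGo A 0 B

-- ===== PRECONDITION & SPEC =====
-- Pre_solve is exactly the inputs on which Python A returns: it excludes inputs where
-- A raises IndexError (order queue exhausted while tasks remain) or loops forever
-- (a required task absent from the pending queue) — i.e. it requires A to be, as a
-- multiset, exactly the first A.length elements of B.
def Pre_solve (A : List Int) (B : List Int) : Prop :=
  (A : Multiset Int) = ((B.take A.length : List Int) : Multiset Int)
instance (A : List Int) (B : List Int) : Decidable (Pre_solve A B) := by unfold Pre_solve; infer_instance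

def pvWitness_solve : List Int × List Int := ([2, 1], [1, 2, 3])

def Spec_solve (A : List Int) (B : List Int) (out : Int) : Prop := out = solve_alt A B
instance (A : List Int) (B : List Int) (out : Int) : Decidable (Spec_solve A B out) := by unfold Spec_solve; infer_instance

-- ===== CLAIM (what is proved, stated in full; the proofs are below) =====
def Claim_equal_solve : Prop := ∀ (A : List Int) (B : List Int), Dom_solve A B → Pre_solve A B → Spec_solve A B (solve A B)

-- ===== LEMMAS AND PROOFS =====

-- the abstract while loop: state reduced to the queue CONTENTS (task deque, pending order)
def loopAbs : Nat → List Int → List Int → Int → Option Int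
  | 0, _, _, _ => none
  | _+1, [], _, c => some c
  | fuel+1, d :: D', O, c =>
    match O with
    | [] => none
    | o :: O' =>
      if d = o then loopAbs fuel D' O' (c + 1)
      else loopAbs fuel (D' ++ [d]) (o :: O') (c + 1)

-- building a queue by repeated enqueue
theorem foldl_pyEnqueue (L : List Int) (s e : Int) (q : List Int) :
    L.foldl pyEnqueue ⟨s, e, q⟩ = ⟨s, e + L.length, q ++ L⟩ := by
  induction L generalizing e q with
  | nil => simp
  | cons x xs ih =>
      simp only [List.foldl_cons, pyEnqueue, ih, List.length_cons]
      simp only [PyQueue.mk.injEq, List.append_assoc, List.singleton_append, true_and]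
      constructor
      · push_cast; ring
      · simp

-- the concrete loop, on states satisfying the queue invariants, computes the
-- abstract loop on the queue contents
theorem solveLoop_eq_loopAbs (fuel : Nat) :
    ∀ (ts te : Int) (tq : List Int) (os oe : Int) (oq : List Int) (c : Int),
    -1 ≤ ts → ts ≤ te → te = (tq.length : Int) - 1 →
    -1 ≤ os → os ≤ oe → oe = (oq.length : Int) - 1 →
    solveLoop fuel ⟨ts, te, tq⟩ ⟨os, oe, oq⟩ c
      = loopAbs fuel (tq.drop (ts + 1).toNat) (oq.drop (os + 1).toNat) c := by
  induction fuel with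
  | zero => intro ts te tq os oe oq c _ _ _ _ _ _; rfl
  | succ f ih =>
      intro ts te tq os oe oq c h1 h2 h3 h4 h5 h6
      by_cases hemp : ts = te
      · subst hemp
        rw [List.drop_eq_nil_of_le (by omega)]
        simp [solveLoop, pyIsEmpty, loopAbs]
      · have hlt : (ts + 1).toNat < tq.length := by omega
        have hfrontT : pyFront ⟨ts, te, tq⟩ = some tq[(ts + 1).toNat] := by
          simp only [pyFront, PySem.List.pyGet?_of_nonneg _ (show (0:Int) ≤ ts + 1 by omega)]
          exact List.getElem?_eq_getElem hlt
        have hDeq : tq.drop (ts + 1).toNat = tq[(ts + 1).toNat] :: tq.drop ((ts + 1).toNat + 1) :=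
          List.drop_eq_getElem_cons hlt
        obtain ⟨x, hx⟩ : ∃ x, PySem.List.pyGet? tq ts = some x := by
          by_cases h : 0 ≤ ts
          · rw [PySem.List.pyGet?_of_nonneg _ h]
            exact ⟨_, List.getElem?_eq_getElem (by omega)⟩
          · rw [PySem.List.pyGet?_neg _ (by omega) (by omega)]
            exact ⟨_, List.getElem?_eq_getElem (by omega)⟩
        by_cases hOe : oq.length ≤ (os + 1).toNat
        · -- order contents exhausted: Python raises IndexError in front(); both sides none
          have hfrontO : pyFront ⟨os, oe, oq⟩ = none := by
            simp only [pyFront, PySem.List.pyGet?_of_nonneg _ (show (0:Int) ≤ os + 1 by omega)]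
            exact List.getElem?_eq_none hOe
          rw [List.drop_eq_nil_of_le hOe, hDeq]
          simp only [solveLoop, pyIsEmpty, hemp, beq_iff_eq, if_false, hfrontT, hfrontO, loopAbs]
        · have hjlt : (os + 1).toNat < oq.length := by omega
          have hfrontO : pyFront ⟨os, oe, oq⟩ = some oq[(os + 1).toNat] := by
            simp only [pyFront, PySem.List.pyGet?_of_nonneg _ (show (0:Int) ≤ os + 1 by omega)]
            exact List.getElem?_eq_getElem hjlt
          have hOeq : oq.drop (os + 1).toNat = oq[(os + 1).toNat] :: oq.drop ((os + 1).toNat + 1) :=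
            List.drop_eq_getElem_cons hjlt
          obtain ⟨y, hy⟩ : ∃ y, PySem.List.pyGet? oq os = some y := by
            by_cases h : 0 ≤ os
            · rw [PySem.List.pyGet?_of_nonneg _ h]
              exact ⟨_, List.getElem?_eq_getElem (by omega)⟩
            · rw [PySem.List.pyGet?_neg _ (by omega) (by omega)]
              exact ⟨_, List.getElem?_eq_getElem (by omega)⟩
          by_cases hcmp : tq[(ts + 1).toNat] = oq[(os + 1).toNat]
          · -- match: dequeue both
            rw [hDeq, hOeq]
            simp only [solveLoop, pyIsEmpty, hemp, beq_iff_eq, if_false, hfrontT, hfrontO,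
              pyDequeue, hx, hy, Option.map_some, loopAbs, hcmp, if_true]
            rw [ih (ts + 1) te tq (os + 1) oe oq (c + 1) (by omega) (by omega) h3
              (by omega) (by omega) h6]
            rw [show (ts + 1 + 1).toNat = (ts + 1).toNat + 1 by omega,
              show (os + 1 + 1).toNat = (os + 1).toNat + 1 by omega]
          · -- no match: rotate the task queue
            rw [hDeq, hOeq]
            simp only [solveLoop, pyIsEmpty, hemp, beq_iff_eq, if_false, hfrontT, hfrontO,
              pyDequeue, hx, Option.map_some, if_neg hcmp, pyEnqueue, loopAbs]
            rw [ih (ts + 1) (te + 1) (tq ++ [tq[(ts + 1).toNat]]) os oe oq (c + 1)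
              (by omega) (by omega) (by simp; omega) h4 h5 h6]
            rw [show (ts + 1 + 1).toNat = (ts + 1).toNat + 1 by omega,
              List.drop_append_of_le_length (by omega), ← hOeq]

-- rotate-until-match: k rotations followed by one matching step
theorem loopAbs_rotate (k : Nat) :
    ∀ (fuel : Nat) (D : List Int) (o : Int) (O' : List Int) (c : Int),
    PySem.List.index? D o = some k → k < fuel →
    loopAbs fuel D (o :: O') c
      = loopAbs (fuel - (k + 1)) (D.drop (k + 1) ++ D.take k) O' (c + (k : Int) + 1) := by
  induction k with
  | zero =>
      intro fuel D o O' c hidx hfuel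
      obtain ⟨pre, suf, hD, hlen, _⟩ := (PySem.List.index?_eq_some_iff D o 0).1 hidx
      obtain rfl : pre = [] := List.eq_nil_of_length_eq_zero hlen
      obtain ⟨f, rfl⟩ : ∃ f, fuel = f + 1 := ⟨fuel - 1, by omega⟩
      subst hD
      simp [loopAbs]
  | succ k ih =>
      intro fuel D o O' c hidx hfuel
      obtain ⟨pre, suf, hD, hlen, hnot⟩ := (PySem.List.index?_eq_some_iff D o (k + 1)).1 hidx
      obtain ⟨d, pre', rfl⟩ : ∃ d pre', pre = d :: pre' := by
        cases pre with
        | nil => simp at hlen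
        | cons d pre' => exact ⟨d, pre', rfl⟩
      obtain ⟨f, rfl⟩ : ∃ f, fuel = f + 1 := ⟨fuel - 1, by omega⟩
      have hdo : d ≠ o := fun h => hnot (h ▸ List.mem_cons_self ..)
      have hlen' : pre'.length = k := by simpa using hlen
      have hmem : o ∈ pre' ++ o :: suf := by simp
      have hidx' : PySem.List.index? ((pre' ++ o :: suf) ++ [d]) o = some k := by
        rw [PySem.List.index?_append_of_mem _ hmem,
          (PySem.List.index?_eq_some_iff _ o k).2 ⟨pre', suf, rfl, hlen', fun h => hnot (List.mem_cons_of_mem _ h)⟩]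
      have hklen : k + 1 ≤ (pre' ++ o :: suf).length := by simp; omega
      subst hD
      rw [List.cons_append]
      rw [show loopAbs (f + 1) (d :: (pre' ++ o :: suf)) (o :: O') c
            = loopAbs f ((pre' ++ o :: suf) ++ [d]) (o :: O') (c + 1) by
          simp [loopAbs, hdo]]
      rw [ih f _ o O' (c + 1) hidx' (by omega)]
      congr 1
      · omega
      · rw [List.drop_append_of_le_length (by simp; omega),
            List.take_append_of_le_length (by omega)]
        have h1 : (d :: (pre' ++ o :: suf)).drop (k + 1 + 1) = (pre' ++ o :: suf).drop (k + 1) := rfl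
        have h2 : (d :: (pre' ++ o :: suf)).take (k + 1) = d :: (pre' ++ o :: suf).take k := rfl
        rw [h1, h2, List.append_assoc, List.singleton_append]
      · push_cast; ring

-- with enough fuel, the abstract loop computes B's phase recursion
theorem loopAbs_eq_alt (n : Nat) :
    ∀ (D O : List Int) (c : Int) (fuel : Nat),
    D.length = n → n * n < fuel →
    (D : Multiset Int) = ((O.take n : List Int) : Multiset Int) →
    loopAbs fuel D O c = some (solveAltGo D c O) := by
  induction n with
  | zero =>
      intro D O c fuel hlen hfuel hms
      obtain rfl : D = [] := List.eq_nil_of_length_eq_zero hlen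
      obtain ⟨f, rfl⟩ : ∃ f, fuel = f + 1 := ⟨fuel - 1, by omega⟩
      cases O with
      | nil => simp [loopAbs, solveAltGo]
      | cons o O' => simp [loopAbs, solveAltGo]
  | succ n ih =>
      intro D O c fuel hlen hfuel hms
      have hexp : (n + 1) * (n + 1) = n * n + 2 * n + 1 := by ring
      have hD : D ≠ [] := by intro h; subst h; simp at hlen
      cases O with
      | nil =>
          exfalso
          have := congrArg Multiset.card hms
          simp [hlen] at this
      | cons o O' =>
          rw [List.take_succ_cons] at hms
          have homem : o ∈ D := by
            rw [← Multiset.mem_coe, hms]; simp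
          obtain ⟨k, hk⟩ := Option.isSome_iff_exists.1
            ((PySem.List.index?_isSome_iff D o).2 homem)
          obtain ⟨hklt, hDk, -⟩ := PySem.List.getElem_of_index?_eq_some hk
          have hkle : k ≤ n := by omega
          rw [loopAbs_rotate k fuel D o O' c hk (by omega)]
          have hsplit : D = D.take k ++ o :: D.drop (k + 1) := by
            conv_lhs => rw [← List.take_append_drop k D]
            rw [List.drop_eq_getElem_cons hklt, hDk]
          have hms2 : ((D.drop (k + 1) ++ D.take k : List Int) : Multiset Int)
              = ((O'.take n : List Int) : Multiset Int) := by
            have h1 : (D : Multiset Int)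
                = o ::ₘ ((D.drop (k + 1) ++ D.take k : List Int) : Multiset Int) := by
              conv_lhs => rw [hsplit]
              simp only [← Multiset.coe_add, ← Multiset.cons_coe]
              rw [Multiset.add_cons]
              rw [add_comm]
            rw [h1, ← Multiset.cons_coe] at hms
            exact (Multiset.cons_inj_right o).1 hms
          have hlen2 : (D.drop (k + 1) ++ D.take k).length = n := by
            simp [hlen]; omega
          have hfuel2 : n * n < fuel - (k + 1) := by omega
          rw [ih _ O' (c + (k : Int) + 1) _ hlen2 hfuel2 hms2]
          have halt : solveAltGo D c (o :: O')
              = solveAltGo (D.drop (k + 1) ++ D.take k) (c + (k : Int) + 1) O' := by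
            rw [solveAltGo, if_neg hD, hk]
            show solveAltGo (PySem.List.slice D (some ((k : Int) + 1)) none
              ++ PySem.List.slice D none (some (k : Int))) (c + (k : Int) + 1) O' = _
            rw [show ((k : Int) + 1) = ((k + 1 : Nat) : Int) by omega,
              PySem.List.slice_from_natCast, PySem.List.slice_to_natCast]
          rw [halt]

-- ===== VERDICT (by name: the statement is the Claim_ definition above) =====
theorem solve_spec : Claim_equal_solve := by
  intro A B _ hpre
  unfold Spec_solve solve solve_alt
  have hb := foldl_pyEnqueue B (-1) (-1) []
  have ha := foldl_pyEnqueue A (-1) (-1) []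
  simp only [pyQueueNew, hb, ha, List.nil_append]
  rw [solveLoop_eq_loopAbs _ _ _ _ _ _ _ _ (by omega) (by omega) (by omega)
      (by omega) (by omega) (by omega)]
  simp only [neg_add_cancel, Int.toNat_zero, List.drop_zero]
  rw [loopAbs_eq_alt A.length A B 0 (A.length * A.length + 1) rfl (by omega) hpre]
  rfl
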